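-- pv_equiv track=rewrite | github.com/brad-eisenhauer/advent-of-code-2021 | aoc2021/aoc24.py | divide_program
-- ===== SOURCE A (Python) =====
-- from typing import Iterable, Iterator, Sequence, TextIO, Optional, Callable
--
-- Program = Sequence[str]
--
-- def divide_program(program: Program) -> Sequence[Program]:
--     """
--     Split a program into sub-programs, such that each starts with an 'inp' instruction
--     """
--     result = []
--     next_sub_prog = []
--     for line in program:
--         if line.startswith("inp"):
--             result.append(next_sub_prog)
--             next_sub_prog = [line]
--         else:
--             next_sub_prog.append(line)
--     result.append(next_sub_prog)
--     return result[1:]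
-- ===== SOURCE B (Python) =====
-- def divide_program(program):
--     lines = list(program)
--     starts = [i for i, line in enumerate(lines) if line.startswith("inp")]
--     ends = starts[1:] + [len(lines)]
--     return [lines[s:e] for s, e in zip(starts, ends)]
-- ===== Notes on version B (the rewrite author's own statement) =====
-- stated objective: alternative
-- what changed: B replaces A's single accumulator loop (growing a current chunk, appending it on each 'inp', then dropping the leading pre-'inp' chunk) with an index-based decomposition: one scan collects the indices of 'inp' lines, and the result is built by slicing between consecutive start indices.
import Mathlib
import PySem

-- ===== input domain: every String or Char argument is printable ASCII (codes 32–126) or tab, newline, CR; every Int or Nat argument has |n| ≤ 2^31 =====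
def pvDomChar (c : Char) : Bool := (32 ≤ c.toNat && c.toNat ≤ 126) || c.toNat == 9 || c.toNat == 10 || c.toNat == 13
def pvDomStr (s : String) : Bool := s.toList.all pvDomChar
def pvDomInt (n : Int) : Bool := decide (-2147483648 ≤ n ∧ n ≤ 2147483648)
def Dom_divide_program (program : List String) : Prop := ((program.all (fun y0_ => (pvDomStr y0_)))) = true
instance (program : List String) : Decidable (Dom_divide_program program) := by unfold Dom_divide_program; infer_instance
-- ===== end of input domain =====

-- B splits by collected 'inp' indices and slicing instead of A's accumulator loop; alternative decomposition, same cost.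

-- ===== PORT A =====
def divide_program (program : List String) : List (List String) :=
  let st := program.foldl
    (fun (s : List (List String) × List String) line =>
      if PySem.Str.startswith line "inp" then (s.1 ++ [s.2], [line])
      else (s.1, s.2 ++ [line]))
    ([], [])
  PySem.List.slice (st.1 ++ [st.2]) (some 1) none

-- ===== PORT B =====
def divide_program_alt (program : List String) : List (List String) :=
  let starts : List Int :=
    ((PySem.List.enumerate program).filter (fun q => PySem.Str.startswith q.2 "inp")).map (·.1)
  let ends : List Int := starts.drop 1 ++ [(program.length : Int)]
  (starts.zip ends).map (fun q => PySem.List.slice program (some q.1) (some q.2))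

-- ===== PRECONDITION & SPEC =====
def Spec_divide_program (program : List String) (out : List (List String)) : Prop := out = divide_program_alt program
instance (program : List String) (out : List (List String)) : Decidable (Spec_divide_program program out) := by unfold Spec_divide_program; infer_instance

-- ===== CLAIM (what is proved, stated in full; the proofs are below) =====
def Claim_equal_divide_program : Prop := ∀ (program : List String), Dom_divide_program program → Spec_divide_program program (divide_program program)

-- ===== LEMMAS AND PROOFS =====

/-- predicate: line starts with "inp" -/
def pvIsInp (line : String) : Bool := PySem.Str.startswith line "inp"

/-- reference chunker: A's loop, written structurally -/
def chunksAux (cur : List String) : List String → List (List String)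
  | [] => [cur]
  | x :: xs => if pvIsInp x then cur :: chunksAux [x] xs else chunksAux (cur ++ [x]) xs

/-- B's start-index list, as a named helper for the proofs -/
def startsL (l : List String) (s : Int) : List Int :=
  ((PySem.List.enumerate l s).filter (fun q => PySem.Str.startswith q.2 "inp")).map (·.1)

theorem startsL_nil (s : Int) : startsL [] s = [] := by
  simp [startsL, PySem.List.enumerate_nil]

theorem startsL_cons (x : String) (xs : List String) (s : Int) :
    startsL (x :: xs) s
      = if pvIsInp x then s :: startsL xs (s + 1) else startsL xs (s + 1) := by
  by_cases h : pvIsInp x <;>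
    simp_all [startsL, PySem.List.enumerate_cons, pvIsInp]

theorem foldlA_eq (l : List String) (res : List (List String)) (cur : List String) :
    (l.foldl
      (fun (s : List (List String) × List String) line =>
        if PySem.Str.startswith line "inp" then (s.1 ++ [s.2], [line])
        else (s.1, s.2 ++ [line])) (res, cur)).1
    ++ [(l.foldl
      (fun (s : List (List String) × List String) line =>
        if PySem.Str.startswith line "inp" then (s.1 ++ [s.2], [line])
        else (s.1, s.2 ++ [line])) (res, cur)).2]
    = res ++ chunksAux cur l := by
  induction l generalizing res cur with
  | nil => simp [chunksAux]
  | cons x xs ih =>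
    by_cases h : pvIsInp x
    · simp [List.foldl, chunksAux, pvIsInp] at *
      simp [h, ih]
    · simp [List.foldl, chunksAux, pvIsInp] at *
      simp [h, ih]

theorem chunksAux_eq (l : List String) (cur : List String) :
    chunksAux cur l
      = (cur ++ l.takeWhile (fun y => !pvIsInp y)) :: (chunksAux [] l).tail := by
  induction l generalizing cur with
  | nil => simp [chunksAux]
  | cons x xs ih =>
    by_cases h : pvIsInp x
    · simp [chunksAux, h, ih [x]]
    · simp [chunksAux, h, ih (cur ++ [x])]
      rw [ih [x]]
      simp

/-- head of the start-index list (default: end of list) is the offset of the first 'inp' -/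
theorem starts_headD (l : List String) (s : Int) :
    (startsL l s).headD (s + l.length)
      = s + (l.takeWhile (fun y => !pvIsInp y)).length := by
  induction l generalizing s with
  | nil => simp [startsL_nil]
  | cons x xs ih =>
    by_cases h : pvIsInp x
    · simp [startsL_cons, h]
    · simp only [startsL_cons, h, if_neg, Bool.false_eq_true, not_false_iff, if_false,
        List.takeWhile_cons, Bool.not_eq_true']
      simp only [h, Bool.not_false, if_true, List.length_cons]
      have := ih (s + 1)
      push_cast at this ⊢
      rw [show s + ((xs.length : Int) + 1) = s + 1 + xs.length by ring, this]
      ring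

theorem zip_shift (s T : Int) (S : List Int) :
    (s :: S).zip (S ++ [T]) = (s, S.headD T) :: S.zip (S.drop 1 ++ [T]) := by
  cases S <;> simp

/-- main lemma: B's slice construction equals the tail of the reference chunker -/
theorem sliceB_eq (l : List String) : ∀ (pre : List String),
    ((startsL l pre.length).zip
        ((startsL l pre.length).drop 1 ++ [((pre ++ l).length : Int)])).map
      (fun q => PySem.List.slice (pre ++ l) (some q.1) (some q.2))
    = (chunksAux [] l).tail := by
  induction l with
  | nil => intro pre; simp [startsL_nil, chunksAux]
  | cons x xs ih =>
    intro pre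
    by_cases h : pvIsInp x
    · -- an 'inp' line opens a new chunk
      rw [startsL_cons, if_pos h]
      simp only [List.drop_one, List.tail_cons]
      rw [zip_shift]
      have hT : ((pre ++ x :: xs).length : Int) = ((pre.length : Int) + 1) + (xs.length : Int) := by
        simp; ring
      have hhead : (startsL xs ((pre.length : Int) + 1)).headD ((pre ++ x :: xs).length : Int)
          = (pre.length : Int) + ((1 + (xs.takeWhile (fun y => !pvIsInp y)).length : Nat) : Int) := by
        rw [hT, starts_headD]; push_cast; ring
      have hrest :
          ((startsL xs ((pre.length : Int) + 1)).zip
              ((startsL xs ((pre.length : Int) + 1)).drop 1 ++ [((pre ++ x :: xs).length : Int)])).map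
            (fun q => PySem.List.slice (pre ++ x :: xs) (some q.1) (some q.2))
          = (chunksAux [] xs).tail := by
        have := ih (pre ++ [x])
        simpa [List.append_assoc] using this
      have hslice : PySem.List.slice (pre ++ x :: xs) (some (pre.length : Int))
            (some ((pre.length : Int) + ((1 + (xs.takeWhile (fun y => !pvIsInp y)).length : Nat) : Int)))
          = x :: xs.takeWhile (fun y => !pvIsInp y) := by
        rw [PySem.List.slice_natCast_add]
        rw [show (pre ++ x :: xs).drop pre.length = x :: xs by simp]
        rw [Nat.add_comm 1, List.take_succ_cons]
        exact congrArg _ (List.prefix_iff_eq_take.mp (List.takeWhile_prefix _)).symm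
      simp only [List.map_cons, hhead, hslice, hrest]
      rw [show chunksAux [] (x :: xs) = [] :: chunksAux [x] xs by simp [chunksAux, h]]
      rw [List.tail_cons, chunksAux_eq xs [x]]
      simp
    · -- a non-'inp' line before the next chunk boundary
      rw [startsL_cons, if_neg (by simp [h])]
      have := ih (pre ++ [x])
      have hcast : ((pre ++ [x]).length : Int) = (pre.length : Int) + 1 := by simp
      rw [hcast, List.append_assoc] at this
      simp only [List.singleton_append] at this
      rw [this]
      rw [show chunksAux [] (x :: xs) = chunksAux [x] xs by simp [chunksAux, h]]
      rw [chunksAux_eq xs [x], chunksAux_eq xs []]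
      simp

-- ===== VERDICT (by name: the statement is the Claim_ definition above) =====
theorem divide_program_spec : Claim_equal_divide_program := by
  intro program _
  unfold Spec_divide_program divide_program divide_program_alt
  rw [PySem.List.slice_from_one, foldlA_eq]
  have := sliceB_eq program []
  simpa [startsL, List.tail] using this.symm
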